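-- pv_equiv track=rewrite | github.com/HaXrDEV/Modpack-Tool | Modpack-Export.py | _strip_double_slash_comments
-- ===== SOURCE A (Python) =====
-- def _strip_double_slash_comments(line: str) -> str:
--     text = str(line or "")
--     output = []
--     in_string = False
--     escaped = False
--
--     for i, ch in enumerate(text):
--         if escaped:
--             output.append(ch)
--             escaped = False
--             continue
--
--         if ch == "\\" and in_string:
--             output.append(ch)
--             escaped = True
--             continue
--
--         if ch == '"':
--             output.append(ch)
--             in_string = not in_string
--             continue
--
--         if not in_string and ch == "/" and i + 1 < len(text) and text[i + 1] == "/":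
--             break
--
--         output.append(ch)
--
--     return "".join(output)
-- ===== SOURCE B (Python) =====
-- def _strip_double_slash_comments(line: str) -> str:
--     text = str(line or "")
--     n = len(text)
--     res = []
--     i = 0
--     while i < n:
--         ch = text[i]
--         if ch == '"':
--             j = i + 1
--             while j < n:
--                 if text[j] == '\\':
--                     j += 2
--                 elif text[j] == '"':
--                     j += 1
--                     break
--                 else:
--                     j += 1
--             res.append(text[i:j])
--             i = j
--         elif text.startswith('//', i):
--             break
--         else:
--             res.append(ch)
--             i += 1
--     return ''.join(res)
-- ===== Notes on version B (the rewrite author's own statement) =====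
-- stated objective: alternative
-- what changed: B replaces A's per-character in_string/escaped state machine with a two-level scan: an outer loop that copies ordinary characters and checks for the double-slash comment marker only between literals, and an inner loop that skips a whole string literal (handling backslash escapes by jumping two positions) and copies it as one slice.
import Mathlib
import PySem

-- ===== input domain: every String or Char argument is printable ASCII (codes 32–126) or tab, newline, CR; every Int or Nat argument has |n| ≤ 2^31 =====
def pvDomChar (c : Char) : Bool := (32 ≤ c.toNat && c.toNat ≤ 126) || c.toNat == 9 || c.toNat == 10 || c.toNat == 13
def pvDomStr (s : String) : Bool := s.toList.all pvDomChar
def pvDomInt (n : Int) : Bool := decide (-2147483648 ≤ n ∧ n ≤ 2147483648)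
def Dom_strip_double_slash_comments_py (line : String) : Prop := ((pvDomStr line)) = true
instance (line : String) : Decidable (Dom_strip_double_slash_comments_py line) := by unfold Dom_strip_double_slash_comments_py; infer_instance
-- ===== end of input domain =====

-- B drops A's per-character state machine (in_string/escaped booleans) in favour of a two-level
-- scan that copies whole string literals as slices and checks for '//' only between literals.

-- ===== PORT A =====
-- A's for-loop over enumerate(text), state (output, in_string, escaped); 'break' returns output.
-- 'text = str(line or "")' is 'line' itself for a str argument (the empty string is its own 'or' result).
def pvStripLoop (text : List Char) : List (Int × Char) → List Char → Bool → Bool → List Char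
  | [], out, _, _ => out
  | (i, ch) :: rest, out, inStr, esc =>
    if esc then pvStripLoop text rest (out ++ [ch]) inStr false
    else if ch == '\\' && inStr then pvStripLoop text rest (out ++ [ch]) inStr true
    else if ch == '"' then pvStripLoop text rest (out ++ [ch]) (!inStr) esc
    else if !inStr && ch == '/' && decide (i + 1 < (text.length : Int)) && (PySem.List.pyGet? text (i + 1) == some '/') then out
    else pvStripLoop text rest (out ++ [ch]) inStr esc

def strip_double_slash_comments_py (line : String) : String :=
  -- '"".join(output)' over single characters is String.ofList
  String.ofList (pvStripLoop line.toList (PySem.List.enumerate line.toList) [] false false)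

-- ===== PORT B =====
-- B's inner while loop: from position j inside a string literal, return the index just past the
-- closing quote (or past the end, if the literal is unterminated).
def pvInner (text : List Char) (n : Nat) (j : Nat) : Nat :=
  if h : j < n then
    if text[j]! == '\\' then pvInner text n (j + 2)
    else if text[j]! == '"' then j + 1
    else pvInner text n (j + 1)
  else j
termination_by n - j
decreasing_by
  · omega
  · omega

-- the inner loop only moves forward (needed for the outer loop's termination)
lemma pvInner_ge_aux (text : List Char) (n : Nat) : ∀ (k j : Nat), n - j ≤ k → j ≤ pvInner text n j := by
  intro k
  induction k with
  | zero =>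
    intro j hk
    rw [pvInner, dif_neg (by omega)]
  | succ k ih =>
    intro j hk
    rw [pvInner]
    split_ifs with h1 h2 h3
    · have := ih (j + 2) (by omega); omega
    · omega
    · have := ih (j + 1) (by omega); omega
    · omega

lemma pvInner_ge (text : List Char) (n : Nat) (j : Nat) : j ≤ pvInner text n j :=
  pvInner_ge_aux text n (n - j) j le_rfl

-- B's outer while loop: res collects chunks (whole string literals and single characters).
def pvOuter (text : List Char) (n : Nat) (i : Nat) (res : List (List Char)) : List (List Char) :=
  if _h : i < n then
    if text[i]! == '"' then
      pvOuter text n (pvInner text n (i + 1))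
        (res ++ [PySem.List.slice text (some (i : Int)) (some ((pvInner text n (i + 1) : Nat) : Int))])
    else if PySem.List.slice text (some (i : Int)) (some ((i : Int) + 2)) == ['/', '/'] then res
    else pvOuter text n (i + 1) (res ++ [[text[i]!]])
  else res
termination_by n - i
decreasing_by
  · have := pvInner_ge text n (i + 1); omega
  · omega

def strip_double_slash_comments_py_alt (line : String) : String :=
  -- ''.join(res) over the collected chunks is flatten
  String.ofList ((pvOuter line.toList line.toList.length 0 []).flatten)

-- ===== PRECONDITION & SPEC =====
def Spec_strip_double_slash_comments_py (line : String) (out : String) : Prop := out = strip_double_slash_comments_py_alt line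
instance (line : String) (out : String) : Decidable (Spec_strip_double_slash_comments_py line out) := by unfold Spec_strip_double_slash_comments_py; infer_instance

-- ===== CLAIM (what is proved, stated in full; the proofs are below) =====
def Claim_equal_strip_double_slash_comments_py : Prop := ∀ (line : String), Dom_strip_double_slash_comments_py line → Spec_strip_double_slash_comments_py line (strip_double_slash_comments_py line)

-- ===== LEMMAS AND PROOFS =====

-- A's loop only ever appends to its accumulator
lemma pvStrip_acc (text : List Char) : ∀ (l : List (Int × Char)) (out : List Char) (s e : Bool),
    pvStripLoop text l out s e = out ++ pvStripLoop text l [] s e := by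
  intro l
  induction l with
  | nil => intro out s e; simp [pvStripLoop]
  | cons p rest ih =>
    intro out s e
    obtain ⟨i, ch⟩ := p
    simp only [pvStripLoop]
    split_ifs with h1 h2 h3 h4
    · simp only [List.nil_append]; rw [ih (out ++ [ch]), ih [ch]]; simp
    · simp only [List.nil_append]; rw [ih (out ++ [ch]), ih [ch]]; simp
    · simp only [List.nil_append]; rw [ih (out ++ [ch]), ih [ch]]; simp
    · simp
    · simp only [List.nil_append]; rw [ih (out ++ [ch]), ih [ch]]; simp

-- B's outer loop only ever appends to its accumulator
lemma pvOuter_acc (text : List Char) (n : Nat) : ∀ (k i : Nat) (res : List (List Char)),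
    n - i ≤ k → pvOuter text n i res = res ++ pvOuter text n i [] := by
  intro k
  induction k with
  | zero =>
    intro i res hk
    have h : ¬ i < n := by omega
    conv_lhs => rw [pvOuter]
    conv_rhs => rw [pvOuter]
    simp [h]
  | succ k ih =>
    intro i res hk
    conv_lhs => rw [pvOuter]
    conv_rhs => rw [pvOuter]
    split_ifs with h1 h2 h3
    · have hge := pvInner_ge text n (i + 1)
      simp only [List.nil_append]
      rw [ih (pvInner text n (i + 1)) _ (by omega),
          ih (pvInner text n (i + 1)) [PySem.List.slice text (some (i : Int)) (some ((pvInner text n (i + 1) : Nat) : Int))] (by omega)]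
      simp
    · simp
    · simp only [List.nil_append]
      rw [ih (i + 1) _ (by omega), ih (i + 1) [[text[i]!]] (by omega)]
      simp
    · simp

-- B's bare startswith test equals A's three-part comment test (on the true suffix of text)
lemma pv_cond_eq (text : List Char) (i : Nat) (ch : Char) (rest : List Char)
    (hdrop : text.drop i = ch :: rest) :
    (PySem.List.slice text (some (i : Int)) (some ((i : Int) + 2)) == ['/', '/'])
      = ((ch == '/') && decide ((i : Int) + 1 < (text.length : Int)) && (PySem.List.pyGet? text ((i : Int) + 1) == some '/')) := by
  have hlen : text.length = i + 1 + rest.length := by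
    have := congrArg List.length hdrop
    simp [List.length_drop] at this
    omega
  have hslice : PySem.List.slice text (some (i : Int)) (some ((i : Int) + 2)) = ch :: rest.take 1 := by
    have h2 : ((i : Int) + 2) = ((i + 2 : Nat) : Int) := by push_cast; ring
    rw [h2, PySem.List.slice_natCast, hdrop]
    simp
  have hget : PySem.List.pyGet? text ((i : Int) + 1) = rest.head? := by
    have h1 : ((i : Int) + 1) = ((i + 1 : Nat) : Int) := by push_cast; ring
    rw [h1, PySem.List.pyGet?_natCast]
    rw [show text[i + 1]? = (text.drop i)[1]? from (List.getElem?_drop ..).symm, hdrop]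
    cases rest <;> simp
  rw [hslice, hget]
  cases rest with
  | nil =>
    have hlt : ¬ ((i : Int) + 1 < (text.length : Int)) := by rw [hlen]; simp
    simp [hlt]
  | cons r rs =>
    have hlt : ((i : Int) + 1 < (text.length : Int)) := by rw [hlen]; push_cast; simp
    cases h1 : (ch == '/') <;> cases h2 : (r == '/') <;> simp [hlt, h1, h2, List.head?]

-- while A is inside a string literal, it copies exactly the characters up to pvInner's exit index
lemma pv_inner_sim (text : List Char) : ∀ (k j : Nat) (out : List Char),
    text.length - j ≤ k →
    pvStripLoop text (PySem.List.enumerate (text.drop j) (j : Int)) out true false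
      = out ++ (text.drop j).take (pvInner text text.length j - j)
          ++ pvStripLoop text (PySem.List.enumerate (text.drop (pvInner text text.length j)) ((pvInner text text.length j : Nat) : Int)) [] false false := by
  intro k
  induction k with
  | zero =>
    intro j out hk
    have h : ¬ j < text.length := by omega
    have hd : text.drop j = [] := List.drop_eq_nil_of_le (by omega)
    rw [pvInner]
    simp [h, hd, pvStripLoop]
  | succ k ih =>
    intro j out hk
    by_cases h : j < text.length
    · have hd : text.drop j = text[j] :: text.drop (j + 1) := List.drop_eq_getElem_cons h
      have hbang : text[j]! = text[j] := getElem!_pos text j h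
      rw [hd, PySem.List.enumerate_cons]
      have hcast : (j : Int) + 1 = ((j + 1 : Nat) : Int) := by push_cast; ring
      by_cases hbs : text[j] = '\\'
      · -- backslash inside string: escape the next character
        simp only [pvStripLoop, hbs]
        rw [if_neg (by simp), if_pos (by simp)]
        have hpv : pvInner text text.length j = pvInner text text.length (j + 2) := by
          rw [pvInner]; simp [h, hbs]
        by_cases h1 : j + 1 < text.length
        · have hd1 : text.drop (j + 1) = text[j + 1] :: text.drop (j + 2) := List.drop_eq_getElem_cons h1
          rw [hd1, PySem.List.enumerate_cons]
          simp only [pvStripLoop]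
          have hcast2 : (j : Int) + 1 + 1 = ((j + 2 : Nat) : Int) := by push_cast; ring
          rw [hcast2, ih (j + 2) (out ++ ['\\'] ++ [text[j + 1]]) (by omega)]
          have hge := pvInner_ge text text.length (j + 2)
          rw [hpv,
            show pvInner text text.length (j + 2) - j = (pvInner text text.length (j + 2) - (j + 2)) + 1 + 1 by omega]
          simp only [List.take_succ_cons, List.cons_append, List.append_assoc, List.nil_append, if_true]
        · have hd1 : text.drop (j + 1) = [] := List.drop_eq_nil_of_le (by omega)
          rw [hd1]
          simp only [PySem.List.enumerate, pvStripLoop]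
          have hpv2 : pvInner text text.length (j + 2) = j + 2 := by
            rw [pvInner]; simp [show ¬ j + 2 < text.length by omega]
          rw [hpv, hpv2]
          have hd2 : text.drop (j + 2) = [] := List.drop_eq_nil_of_le (by omega)
          rw [hd2]
          simp [PySem.List.enumerate, pvStripLoop]
      · by_cases hq : text[j] = '"'
        · -- closing quote: back outside the string
          simp only [pvStripLoop]
          rw [if_neg (by simp), if_neg (by simp [hbs]), if_pos (by simp [hq])]
          have hpv : pvInner text text.length j = j + 1 := by
            rw [pvInner]; simp [h, hq]
          rw [hpv, hcast, pvStrip_acc]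
          have ht : List.take 1 (List.drop j text) = [text[j]] := by rw [hd]; rfl
          simp [ht]
        · -- ordinary character inside the string
          simp only [pvStripLoop]
          rw [if_neg (by simp), if_neg (by simp [hbs]), if_neg (by simp [hq]),
              if_neg (by simp)]
          have hpv : pvInner text text.length j = pvInner text text.length (j + 1) := by
            rw [pvInner]; simp [h, hbs, hq]
          rw [hcast, ih (j + 1) (out ++ [text[j]]) (by omega), hpv]
          have hge := pvInner_ge text text.length (j + 1)
          rw [show pvInner text text.length (j + 1) - j = (pvInner text text.length (j + 1) - (j + 1)) + 1 by omega]
          rw [List.take_succ_cons]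
          simp
    · have hd : text.drop j = [] := List.drop_eq_nil_of_le (by omega)
      rw [pvInner]
      simp [h, hd, pvStripLoop]

-- outside string literals, A's loop produces exactly B's flattened chunk list
lemma pv_outer_sim (text : List Char) : ∀ (k i : Nat),
    text.length - i ≤ k →
    pvStripLoop text (PySem.List.enumerate (text.drop i) (i : Int)) [] false false
      = (pvOuter text text.length i []).flatten := by
  intro k
  induction k with
  | zero =>
    intro i hk
    have h : ¬ i < text.length := by omega
    have hd : text.drop i = [] := List.drop_eq_nil_of_le (by omega)
    rw [pvOuter]
    simp [h, hd, pvStripLoop]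
  | succ k ih =>
    intro i hk
    by_cases h : i < text.length
    · have hd : text.drop i = text[i] :: text.drop (i + 1) := List.drop_eq_getElem_cons h
      have hbang : text[i]! = text[i] := getElem!_pos text i h
      have hcast : (i : Int) + 1 = ((i + 1 : Nat) : Int) := by push_cast; ring
      rw [hd, PySem.List.enumerate_cons, pvOuter]
      by_cases hq : text[i] = '"'
      · -- opening quote: A switches in_string on; B copies the whole literal as one slice
        simp only [pvStripLoop]
        rw [if_neg (by simp), if_neg (by simp [hq]), if_pos (by simp [hq])]
        rw [dif_pos h, hbang, if_pos (by simp [hq])]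
        set j := pvInner text text.length (i + 1) with hj
        have hge : i + 1 ≤ j := pvInner_ge text text.length (i + 1)
        rw [hcast, pvStrip_acc]
        simp only [Bool.not_false, List.nil_append]
        rw [pv_inner_sim text (text.length - (i + 1)) (i + 1) [] (by omega)]
        rw [ih j (by omega)]
        rw [pvOuter_acc text text.length (text.length - j) j
          ([PySem.List.slice text (some (i : Int)) (some ((j : Nat) : Int))]) (by omega)]
        have hslice : PySem.List.slice text (some (i : Int)) (some ((j : Nat) : Int))
            = text[i] :: (text.drop (i + 1)).take (j - (i + 1)) := by
          rw [PySem.List.slice_natCast, hd, show j - i = (j - (i + 1)) + 1 by omega,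
            List.take_succ_cons]
        simp [hslice, hq]
        rw [hj]
      · rw [dif_pos h, hbang, if_neg (by simp [hq])]
        rw [pv_cond_eq text i text[i] (text.drop (i + 1)) hd]
        by_cases hc : ((text[i] == '/') && decide ((i : Int) + 1 < (text.length : Int)) && (PySem.List.pyGet? text ((i : Int) + 1) == some '/')) = true
        · -- comment marker: both stop here
          simp only [pvStripLoop]
          rw [if_neg (by simp), if_neg (by simp), if_neg (by simp [hq]),
              if_pos (by simpa using hc), if_pos hc]
          simp
        · -- ordinary character outside strings
          simp only [pvStripLoop]
          rw [if_neg (by simp), if_neg (by simp), if_neg (by simp [hq]),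
              if_neg (by simpa using hc), if_neg hc]
          rw [hcast, pvStrip_acc, ih (i + 1) (by omega)]
          rw [pvOuter_acc text text.length (text.length - (i + 1)) (i + 1) ([] ++ [[text[i]]]) (by omega)]
          simp
    · have hd : text.drop i = [] := List.drop_eq_nil_of_le (by omega)
      rw [pvOuter]
      simp [h, hd, pvStripLoop]

-- ===== VERDICT (by name: the statement is the Claim_ definition above) =====
theorem strip_double_slash_comments_py_spec : Claim_equal_strip_double_slash_comments_py := by
  intro line _
  unfold Spec_strip_double_slash_comments_py strip_double_slash_comments_py strip_double_slash_comments_py_alt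
  have h := pv_outer_sim line.toList line.toList.length 0 (by omega)
  simp only [List.drop_zero, Nat.cast_zero] at h
  rw [show PySem.List.enumerate line.toList = PySem.List.enumerate line.toList (0 : Int) from rfl, h]
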